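-- pv_equiv track=rewrite | github.com/iman20004/ScriptingLanguages-CSE337 | HW2/rename_files.py | snap_format
-- ===== SOURCE A (Python) =====
-- def snap_format(name):
--     # if file has the snap pattern snapxxx.txt (start and end)
--     if not (name.endswith(".txt") and name.startswith("snap")):
--         return False
--
--     # Wrong length
--     if not len(name) == 11:
--         return False
--
--     # if file has the snap pattern snapxxx.txt (digits)
--     for digit in range(4, 7):
--         if not (name[digit].isdigit()):
--             return False
--
--     return True
-- ===== SOURCE B (Python) =====
-- def snap_format(name):
--     # One length guard, then a single uniform positional pass against a
--     # template: '#' marks a required-digit slot, anything else is literal.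
--     if len(name) != 11:
--         return False
--     for t, c in zip("snap###.txt", name):
--         if t == '#':
--             if not c.isdigit():
--                 return False
--         elif c != t:
--             return False
--     return True
-- ===== Notes on version B (the rewrite author's own statement) =====
-- stated objective: simpler
-- what changed: Replaces A's four separate checks (endswith, startswith, length test, digit loop over indices 4-6) with one length guard plus a single uniform positional pass over a template string whose hash marks denote required-digit slots.
import Mathlib
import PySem

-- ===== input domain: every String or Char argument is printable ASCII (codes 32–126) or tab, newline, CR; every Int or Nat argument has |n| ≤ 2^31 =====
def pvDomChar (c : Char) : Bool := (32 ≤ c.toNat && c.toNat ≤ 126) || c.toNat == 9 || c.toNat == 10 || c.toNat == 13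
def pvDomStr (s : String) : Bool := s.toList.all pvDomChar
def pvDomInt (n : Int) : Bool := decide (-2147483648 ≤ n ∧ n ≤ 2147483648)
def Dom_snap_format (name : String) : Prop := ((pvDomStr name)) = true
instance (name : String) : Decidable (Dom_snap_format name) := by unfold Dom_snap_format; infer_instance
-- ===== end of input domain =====

-- B replaces A's four separate checks with one length guard plus a single
-- positional pass against a template string ('#' = required-digit slot): simpler.

-- ===== PORT A =====
def snap_format (name : String) : Bool :=
  if !(PySem.Str.endswith name ".txt" && PySem.Str.startswith name "snap") then
    false
  else if !(PySem.Str.len name == 11) then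
    false
  else
    -- for digit in range(4, 7): if not name[digit].isdigit(): return False
    (PySem.List.pyRange 4 7 1).all (fun d =>
      match PySem.Str.pyGet? name d with
      | some c => PySem.Chars.isdigit c
      | none => false)  -- unreachable here: len name = 11, so indices 4..6 are in range

-- ===== PORT B =====
def snap_format_alt (name : String) : Bool :=
  if PySem.Str.len name ≠ 11 then
    false
  else
    ("snap###.txt".toList.zip name.toList).all (fun tc =>
      if tc.1 = '#' then PySem.Chars.isdigit tc.2 else tc.2 == tc.1)

-- ===== PRECONDITION & SPEC =====
def Spec_snap_format (name : String) (out : Bool) : Prop := out = snap_format_alt name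
instance (name : String) (out : Bool) : Decidable (Spec_snap_format name out) := by unfold Spec_snap_format; infer_instance

-- ===== CLAIM (what is proved, stated in full; the proofs are below) =====
def Claim_equal_snap_format : Prop := ∀ (name : String), Dom_snap_format name → Spec_snap_format name (snap_format name)

-- ===== LEMMAS AND PROOFS =====
theorem snap_format_eq_alt (name : String) : snap_format name = snap_format_alt name := by
  unfold snap_format snap_format_alt
  simp only [PySem.Str.endswith_eq, PySem.Str.startswith_eq, PySem.Str.len_eq, PySem.Str.pyGet?_eq]
  obtain ⟨l, hl⟩ : ∃ l, name.toList = l := ⟨_, rfl⟩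
  simp only [hl]
  by_cases hlen : l.length = 11
  · match l, hlen with
    | [c0,c1,c2,c3,c4,c5,c6,c7,c8,c9,c10], _ =>
      simp [PySem.Chars.startswith, PySem.Chars.endswith, List.isSuffixOf,
        PySem.List.pyRange, PySem.List.pyGet?, PySem.List.pyIdx?, List.isPrefixOf,
        List.range_succ, Bool.beq_comm]
      rw [Bool.eq_iff_iff]
      simp
      tauto
  · have h11 : ((l.length : Int) = 11) = False := by
      simp; omega
    simp [h11]

-- ===== VERDICT (by name: the statement is the Claim_ definition above) =====
theorem snap_format_spec : Claim_equal_snap_format := by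
  intro name _
  unfold Spec_snap_format
  exact snap_format_eq_alt name
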